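-- pv_equiv track=rewrite | github.com/VuikoPila/APP_IM_2428 | lab7/lab_7_2_P.py | find_min_of_max_in_even_rows
-- ===== SOURCE A (Python) =====
-- def find_max_in_row(row, index=0, current_max=None):
--     if index >= len(row):
--         return current_max
--     if current_max is None or row[index] > current_max:
--         current_max = row[index]
--     return find_max_in_row(row, index + 1, current_max)
--
-- def find_min_of_max_in_even_rows(matrix, row_index=0, max_elements=None):
--     if max_elements is None:
--         max_elements = []
--     if row_index >= len(matrix):
--         return min(max_elements)
--     if row_index % 2 == 0:
--         max_elements.append(find_max_in_row(matrix[row_index]))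
--     return find_min_of_max_in_even_rows(matrix, row_index + 1, max_elements)
-- ===== SOURCE B (Python) =====
-- # Return-value equivalent to A; note: A mutates a caller-passed max_elements list
-- # in place, B does not (equivalence claimed is about the return value only).
-- def find_min_of_max_in_even_rows(matrix, row_index=0, max_elements=None):
--     collected = list(max_elements) if max_elements is not None else []
--     collected += [max(matrix[i], default=None)
--                   for i in range(row_index, len(matrix)) if i % 2 == 0]
--     return min(collected)
-- ===== Notes on version B (the rewrite author's own statement) =====
-- stated objective: idiomatic
-- what changed: Replaced the two accumulator-passing recursive helpers by a single comprehension over range(row_index, len(matrix)) using the built-in max (default=None) and one min call.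
-- outside the precondition, e.g. on find_min_of_max_in_even_rows([[]], 0, None): A returns None, B returns None; on find_min_of_max_in_even_rows([], 0, None): A raises ValueError, B raises ValueError
import Mathlib
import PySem

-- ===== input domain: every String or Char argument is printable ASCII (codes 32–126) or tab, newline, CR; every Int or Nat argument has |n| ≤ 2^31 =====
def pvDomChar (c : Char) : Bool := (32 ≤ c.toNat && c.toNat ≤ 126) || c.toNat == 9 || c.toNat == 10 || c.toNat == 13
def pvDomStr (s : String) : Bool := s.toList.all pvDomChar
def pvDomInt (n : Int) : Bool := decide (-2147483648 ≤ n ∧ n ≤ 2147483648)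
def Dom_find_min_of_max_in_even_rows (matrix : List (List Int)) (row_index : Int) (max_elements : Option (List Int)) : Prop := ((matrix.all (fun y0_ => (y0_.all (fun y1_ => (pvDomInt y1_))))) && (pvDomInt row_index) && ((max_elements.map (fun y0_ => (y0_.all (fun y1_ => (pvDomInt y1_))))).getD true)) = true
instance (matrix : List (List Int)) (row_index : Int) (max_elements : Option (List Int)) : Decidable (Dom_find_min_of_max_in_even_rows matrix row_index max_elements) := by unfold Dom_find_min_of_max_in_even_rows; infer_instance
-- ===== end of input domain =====

-- B replaces A's two accumulator-passing recursions by one comprehension over the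
-- index range plus the built-in max/min (idiomatic rewrite; return value only —
-- A mutates a caller-passed max_elements list in place, B does not).

-- ===== PORT A =====
-- find_max_in_row: literal port; row[index] → pyGet? (in range on every reached call); .getD 0 is unreachable there
def findMaxInRowA (row : List Int) (index : Int) (current_max : Option Int) : Option Int :=
  if _h : index ≥ (row.length : Int) then current_max
  else
    let v : Int := (PySem.List.pyGet? row index).getD 0
    let cm : Option Int :=
      match current_max with
      | none => some v
      | some m => if v > m then some v else some m
    findMaxInRowA row (index + 1) cm
termination_by ((row.length : Int) - index).toNat
decreasing_by simp at _h; omega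

-- the recursive body of A; min([]) raises in Python (excluded by Pre_), ported as .getD 0;
-- an empty even row makes Python append None (excluded by Pre_), ported as .getD 0
def fmGoA (matrix : List (List Int)) (row_index : Int) (max_elements : List Int) : Int :=
  if _h : row_index ≥ (matrix.length : Int) then
    (PySem.List.min? max_elements (fun x => x)).getD 0
  else
    let me : List Int :=
      if PySem.Int.mod row_index 2 = 0 then
        max_elements ++ [(findMaxInRowA ((PySem.List.pyGet? matrix row_index).getD []) 0 none).getD 0]
      else max_elements
    fmGoA matrix (row_index + 1) me
termination_by ((matrix.length : Int) - row_index).toNat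
decreasing_by simp at _h; omega

def find_min_of_max_in_even_rows (matrix : List (List Int)) (row_index : Int) (max_elements : Option (List Int)) : Int :=
  fmGoA matrix row_index (max_elements.getD [])

-- ===== PORT B =====
-- Source B: collected = copy of max_elements (or []) ++ [max(matrix[i], default=None) for i in range(row_index, len(matrix)) if i % 2 == 0]; min(collected)
-- max(row, default=None) → max? … (none for empty row, excluded by Pre_, ported .getD 0); min([]) raises (excluded by Pre_), ported .getD 0
def find_min_of_max_in_even_rows_alt (matrix : List (List Int)) (row_index : Int) (max_elements : Option (List Int)) : Int :=
  let collected : List Int :=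
    (max_elements.getD []) ++
      (((PySem.List.pyRange row_index (matrix.length : Int) 1).filter
          (fun i => PySem.Int.mod i 2 == 0)).map
        (fun i => (PySem.List.max? ((PySem.List.pyGet? matrix i).getD []) (fun x => x)).getD 0))
  (PySem.List.min? collected (fun x => x)).getD 0

-- ===== PRECONDITION & SPEC =====
-- Pre_ excludes exactly the inputs on which Python A does not return an int: every even index
-- in [row_index, len) must be a valid (possibly negative) index of a non-empty row (else
-- IndexError, or None is appended and min raises TypeError / returns None), and the final
-- collection must be non-empty (else min([]) raises ValueError).
-- (the range start is clamped at -len-2 so the condition is quickly decidable: any start below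
-- that already puts an even index < -len inside the clamped range, failing the first conjunct
-- exactly as the unclamped condition would)
def Pre_find_min_of_max_in_even_rows (matrix : List (List Int)) (row_index : Int) (max_elements : Option (List Int)) : Prop :=
  (∀ j ∈ PySem.List.pyRange (max row_index (-(matrix.length : Int) - 2)) (matrix.length : Int) 1,
      PySem.Int.mod j 2 = 0 →
        (-(matrix.length : Int) ≤ j ∧ (PySem.List.pyGet? matrix j).getD [] ≠ [])) ∧
  ((max_elements.getD [] ≠ []) ∨
    ∃ j ∈ PySem.List.pyRange (max row_index (-(matrix.length : Int) - 2)) (matrix.length : Int) 1,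
      PySem.Int.mod j 2 = 0)

instance (matrix : List (List Int)) (row_index : Int) (max_elements : Option (List Int)) : Decidable (Pre_find_min_of_max_in_even_rows matrix row_index max_elements) := by unfold Pre_find_min_of_max_in_even_rows; infer_instance

def pvWitness_find_min_of_max_in_even_rows : List (List Int) × Int × Option (List Int) :=
  ([[1, 2], [3], [0, 5]], 0, none)

def Spec_find_min_of_max_in_even_rows (matrix : List (List Int)) (row_index : Int) (max_elements : Option (List Int)) (out : Int) : Prop := out = find_min_of_max_in_even_rows_alt matrix row_index max_elements
instance (matrix : List (List Int)) (row_index : Int) (max_elements : Option (List Int)) (out : Int) : Decidable (Spec_find_min_of_max_in_even_rows matrix row_index max_elements out) := by unfold Spec_find_min_of_max_in_even_rows; infer_instance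

-- ===== CLAIM (what is proved, stated in full; the proofs are below) =====
def Claim_equal_find_min_of_max_in_even_rows : Prop := ∀ (matrix : List (List Int)) (row_index : Int) (max_elements : Option (List Int)), Dom_find_min_of_max_in_even_rows matrix row_index max_elements → Pre_find_min_of_max_in_even_rows matrix row_index max_elements → Spec_find_min_of_max_in_even_rows matrix row_index max_elements (find_min_of_max_in_even_rows matrix row_index max_elements)

-- ===== LEMMAS AND PROOFS =====

theorem findMaxInRowA_eq (row : List Int) (k : Nat) (cm : Option Int) :
    findMaxInRowA row (k : Int) cm =
      match cm with
      | none => match row.drop k with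
                | [] => none
                | x :: t => some (t.foldl max x)
      | some m => some ((row.drop k).foldl max m) := by
  induction hn : row.length - k using Nat.strong_induction_on generalizing k cm with
  | _ n ih =>
    rw [findMaxInRowA]
    by_cases hk : k < row.length
    · rw [dif_neg (by omega)]
      have hget : PySem.List.pyGet? row (k : Int) = some row[k] := by
        rw [PySem.List.pyGet?_natCast]; simp [hk]
      have hdrop : row.drop k = row[k] :: row.drop (k + 1) :=
        List.drop_eq_getElem_cons hk
      have hcast : ((k : Int) + 1) = ((k + 1 : Nat) : Int) := by push_cast; ring
      have hrec := fun cm' => ih (row.length - (k + 1)) (by omega) (k + 1) cm' rfl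
      cases cm with
      | none =>
        show findMaxInRowA row ((k : Int) + 1) (some ((PySem.List.pyGet? row (k : Int)).getD 0)) = _
        rw [hget, hcast]
        simp only [Option.getD_some]
        rw [hrec (some row[k])]
        rw [hdrop]
      | some m =>
        show findMaxInRowA row ((k : Int) + 1)
            (if ((PySem.List.pyGet? row (k : Int)).getD 0) > m
             then some ((PySem.List.pyGet? row (k : Int)).getD 0) else some m) = _
        rw [hget, hcast]
        simp only [Option.getD_some]
        by_cases hv : row[k] > m
        · rw [if_pos hv, hrec (some row[k]), hdrop]
          simp only [List.foldl_cons]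
          rw [max_eq_right (le_of_lt hv)]
        · rw [if_neg hv, hrec (some m), hdrop]
          simp only [List.foldl_cons]
          rw [max_eq_left (by omega : row[k] ≤ m)]
    · rw [dif_pos (by omega)]
      have : row.drop k = [] := List.drop_eq_nil_of_le (by omega)
      cases cm <;> simp [this]

theorem findMaxInRowA_zero (row : List Int) :
    findMaxInRowA row 0 none = PySem.List.max? row (fun x => x) := by
  have h := findMaxInRowA_eq row 0 none
  simp only [Nat.cast_zero, List.drop_zero] at h
  rw [h]
  cases row with
  | nil => simp [PySem.List.max?]
  | cons x t => rw [PySem.List.max?_id_cons]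

-- the even-row maxima collected from index r on, as B computes them
def evensB (matrix : List (List Int)) (r : Int) : List Int :=
  ((PySem.List.pyRange r (matrix.length : Int) 1).filter
      (fun i => PySem.Int.mod i 2 == 0)).map
    (fun i => (PySem.List.max? ((PySem.List.pyGet? matrix i).getD []) (fun x => x)).getD 0)

theorem fmGoA_eq (matrix : List (List Int)) (r : Int) (acc : List Int) :
    fmGoA matrix r acc = (PySem.List.min? (acc ++ evensB matrix r) (fun x => x)).getD 0 := by
  induction hn : ((matrix.length : Int) - r).toNat using Nat.strong_induction_on generalizing r acc with
  | _ n ih =>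
    rw [fmGoA]
    by_cases hr : r < (matrix.length : Int)
    · rw [dif_neg (by omega)]
      have hcons : PySem.List.pyRange r (matrix.length : Int) 1
          = r :: PySem.List.pyRange (r + 1) (matrix.length : Int) 1 :=
        PySem.List.pyRange_one_cons hr
      have hrec := fun acc' => ih (((matrix.length : Int) - (r + 1)).toNat) (by omega) (r + 1) acc' rfl
      by_cases hmod : PySem.Int.mod r 2 = 0
      · have hdvd : (2 : Int) ∣ r := (PySem.Int.mod_eq_zero_iff_dvd r 2).mp hmod
        rw [if_pos hmod, hrec _]
        simp only [evensB, hcons, List.filter_cons]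
        simp [hdvd, findMaxInRowA_zero, List.append_assoc]
      · have hdvd : ¬ (2 : Int) ∣ r := fun h => hmod ((PySem.Int.mod_eq_zero_iff_dvd r 2).mpr h)
        rw [if_neg hmod, hrec _]
        simp only [evensB, hcons, List.filter_cons]
        simp [hdvd]
    · rw [dif_pos (by omega)]
      have : PySem.List.pyRange r (matrix.length : Int) 1 = [] :=
        PySem.List.pyRange_one_eq_nil (by omega)
      simp [evensB, this]

-- ===== VERDICT (by name: the statement is the Claim_ definition above) =====
theorem find_min_of_max_in_even_rows_spec : Claim_equal_find_min_of_max_in_even_rows := by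
  intro matrix row_index max_elements _dom _pre
  unfold Spec_find_min_of_max_in_even_rows find_min_of_max_in_even_rows find_min_of_max_in_even_rows_alt
  rw [fmGoA_eq]
  rfl
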